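-- pv_equiv track=rewrite | github.com/gjtjdtn201/practice | 백준/Silver/별찍기.py | stars
-- ===== SOURCE A (Python) =====
-- def stars(a):
--     matrix = []
--     for i in range(3 * len(a)):
--         if i // len(a) == 1:
--             matrix.append(a[i % len(a)] + " " * len(a) + a[i%len(a)])
--         else:
--             matrix.append(a[i % len(a)] * 3)
--     return list(matrix)
-- ===== SOURCE B (Python) =====
-- def stars(a):
--     top = [s * 3 for s in a]
--     mid = [s + " " * len(a) + s for s in a]
--     return top + mid + top
-- ===== Notes on version B (the rewrite author's own statement) =====
-- stated objective: simpler
-- what changed: Replaced the single loop over range(3*len(a)) with its i//len(a) branch and i%len(a) modular indexing by direct iteration over a, assembling the three blocks (top, middle, top) and concatenating them.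
import Mathlib
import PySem

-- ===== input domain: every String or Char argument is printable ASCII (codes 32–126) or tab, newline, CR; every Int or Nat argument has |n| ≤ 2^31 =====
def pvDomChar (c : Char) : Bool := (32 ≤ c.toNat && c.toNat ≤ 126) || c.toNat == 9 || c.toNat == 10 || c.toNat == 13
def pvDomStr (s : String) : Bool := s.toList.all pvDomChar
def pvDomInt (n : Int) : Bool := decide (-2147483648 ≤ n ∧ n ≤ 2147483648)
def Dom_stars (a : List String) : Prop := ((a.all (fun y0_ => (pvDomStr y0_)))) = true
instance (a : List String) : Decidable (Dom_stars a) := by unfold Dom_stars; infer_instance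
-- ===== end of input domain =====

-- B is simpler: it builds the three blocks (top, middle, top) by iterating over `a`
-- directly and concatenating them, instead of A's single loop over range(3*len(a))
-- with an i//len(a) branch and i%len(a) modular indexing.

-- shared primitive: Python's string repetition s * n (empty for n ≤ 0)
def strMul (s : String) (n : Int) : String := String.ofList ((List.replicate n.toNat s.toList).flatten)

-- ===== PORT A =====
def stars (a : List String) : List String :=
  (PySem.List.pyRange 0 (3 * PySem.List.len a) 1).foldl (fun matrix i =>
    if PySem.Int.floordiv i (PySem.List.len a) = 1 then
      matrix ++ [PySem.List.pyGetD a (PySem.Int.mod i (PySem.List.len a)) "" ++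
                 strMul " " (PySem.List.len a) ++
                 PySem.List.pyGetD a (PySem.Int.mod i (PySem.List.len a)) ""]
    else
      matrix ++ [strMul (PySem.List.pyGetD a (PySem.Int.mod i (PySem.List.len a)) "") 3]) []

-- ===== PORT B =====
def stars_alt (a : List String) : List String :=
  let top := a.map (fun s => strMul s 3)
  let mid := a.map (fun s => s ++ strMul " " (PySem.List.len a) ++ s)
  top ++ mid ++ top

-- ===== PRECONDITION & SPEC =====
def Spec_stars (a : List String) (out : List String) : Prop := out = stars_alt a
instance (a : List String) (out : List String) : Decidable (Spec_stars a out) := by unfold Spec_stars; infer_instance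

-- ===== CLAIM (what is proved, stated in full; the proofs are below) =====
def Claim_equal_stars : Prop := ∀ (a : List String), Dom_stars a → Spec_stars a (stars a)

-- ===== LEMMAS AND PROOFS =====

-- A's loop body as a per-index row function
def rowA (a : List String) (i : Int) : String :=
  if PySem.Int.floordiv i (PySem.List.len a) = 1 then
    PySem.List.pyGetD a (PySem.Int.mod i (PySem.List.len a)) "" ++
    strMul " " (PySem.List.len a) ++
    PySem.List.pyGetD a (PySem.Int.mod i (PySem.List.len a)) ""
  else
    strMul (PySem.List.pyGetD a (PySem.Int.mod i (PySem.List.len a)) "") 3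

theorem stars_eq_map (a : List String) :
    stars a = (PySem.List.pyRange 0 (3 * PySem.List.len a) 1).map (rowA a) := by
  unfold stars
  have h : (fun (matrix : List String) (i : Int) =>
      if PySem.Int.floordiv i (PySem.List.len a) = 1 then
        matrix ++ [PySem.List.pyGetD a (PySem.Int.mod i (PySem.List.len a)) "" ++
                   strMul " " (PySem.List.len a) ++
                   PySem.List.pyGetD a (PySem.Int.mod i (PySem.List.len a)) ""]
      else
        matrix ++ [strMul (PySem.List.pyGetD a (PySem.Int.mod i (PySem.List.len a)) "") 3])
      = fun matrix i => matrix ++ [rowA a i] := by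
    funext m i
    unfold rowA
    split <;> rfl
  rw [h, PySem.List.foldl_append_singleton_eq_map, List.nil_append]

-- one block: a per-element row function over the index range is a map over a
theorem map_range_get (a : List String) (h : String → String) :
    (List.range a.length).map (fun (k : Nat) => h (PySem.List.pyGetD a ((k : Nat) : Int) "")) = a.map h := by
  have hbase := PySem.List.map_pyGetD_pyRange_zero a ""
  rw [PySem.List.len, PySem.List.pyRange_zero_natCast, List.map_map] at hbase
  rw [show (fun (k : Nat) => h (PySem.List.pyGetD a ((k : Nat) : Int) ""))
      = h ∘ ((fun j => PySem.List.pyGetD a j "") ∘ fun (k : Nat) => ((k : Nat) : Int)) from rfl,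
    ← List.map_map, hbase]

-- ===== VERDICT (by name: the statement is the Claim_ definition above) =====
theorem stars_spec : Claim_equal_stars := by
  unfold Claim_equal_stars
  intro a _
  unfold Spec_stars stars_alt
  rw [stars_eq_map]
  set n := a.length with hn
  have hlen : PySem.List.len a = (n : Int) := by simp [PySem.List.len, hn]
  have h3 : 3 * PySem.List.len a = ((3 * n : Nat) : Int) := by rw [hlen]; push_cast; ring
  rw [h3, PySem.List.pyRange_zero_natCast, List.map_map]
  have hsplit : 3 * n = n + (n + n) := by omega
  rw [hsplit, List.range_add, List.range_add, List.map_append, List.map_append,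
      List.map_append, List.map_map, List.map_map, List.map_map]
  have htop : (List.range n).map (rowA a ∘ fun (k : Nat) => ((k : Nat) : Int))
      = a.map (fun s => strMul s 3) := by
    rw [← map_range_get a (fun s => strMul s 3)]
    apply List.map_congr_left
    intro k hk
    have hkn : k < n := List.mem_range.mp hk
    simp only [Function.comp_apply, rowA, hlen, PySem.Int.floordiv_natCast, PySem.Int.mod_natCast,
      Nat.div_eq_of_lt hkn, Nat.mod_eq_of_lt hkn]
    norm_num
  have hmid : (List.range n).map ((rowA a ∘ fun (k : Nat) => ((k : Nat) : Int)) ∘ fun x => n + x)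
      = a.map (fun s => s ++ strMul " " (PySem.List.len a) ++ s) := by
    rw [← map_range_get a (fun s => s ++ strMul " " (PySem.List.len a) ++ s)]
    apply List.map_congr_left
    intro k hk
    have hkn : k < n := List.mem_range.mp hk
    have hnpos : 0 < n := by omega
    have hdiv : (n + k) / n = 1 := by
      rw [Nat.add_comm, Nat.add_div_right _ hnpos, Nat.div_eq_of_lt hkn]
    have hmod : (n + k) % n = k := by
      rw [Nat.add_comm, Nat.add_mod_right, Nat.mod_eq_of_lt hkn]
    simp only [Function.comp_apply, rowA, hlen, PySem.Int.floordiv_natCast, PySem.Int.mod_natCast,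
      hdiv, hmod]
    norm_num
  have hbot : (List.range n).map (((rowA a ∘ fun (k : Nat) => ((k : Nat) : Int)) ∘ fun x => n + x) ∘ fun x => n + x)
      = a.map (fun s => strMul s 3) := by
    rw [← map_range_get a (fun s => strMul s 3)]
    apply List.map_congr_left
    intro k hk
    have hkn : k < n := List.mem_range.mp hk
    have hnpos : 0 < n := by omega
    have hdiv : (n + (n + k)) / n = 2 := by
      have h2 : n + (n + k) = k + n + n := by ring
      rw [h2, Nat.add_div_right _ hnpos, Nat.add_div_right _ hnpos, Nat.div_eq_of_lt hkn]
    have hmod : (n + (n + k)) % n = k := by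
      have : n + (n + k) = k + n + n := by ring
      rw [this, Nat.add_mod_right, Nat.add_mod_right, Nat.mod_eq_of_lt hkn]
    simp only [Function.comp_apply, rowA, hlen, PySem.Int.floordiv_natCast, PySem.Int.mod_natCast,
      hdiv, hmod]
    norm_num
  rw [htop, hmid, hbot]
  simp
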